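-- pv_equiv track=rewrite | github.com/dvschultz/video-hacking | src/pitch_utils.py | find_semitone_matches
-- ===== SOURCE A (Python) =====
-- from typing import Union, List, Tuple, Optional
--
-- def find_semitone_matches(target_midi: int, available_midi_notes: List[int],
--                          max_distance: int = 2) -> List[Tuple[int, int]]:
--     """
--     Find MIDI notes within N semitones of target.
--
--     Args:
--         target_midi: Target MIDI note number
--         available_midi_notes: List of available MIDI notes
--         max_distance: Maximum semitone distance (default: 2)
--
--     Returns:
--         List of (midi_note, distance) tuples, sorted by distance
--
--     Examples:
--         >>> find_semitone_matches(60, [59, 60, 61, 63], max_distance=2)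
--         [(60, 0), (59, 1), (61, 1)]
--     """
--     matches = []
--     for midi in available_midi_notes:
--         distance = abs(midi - target_midi)
--         if distance <= max_distance:
--             matches.append((midi, distance))
--
--     # Sort by distance (closest first)
--     matches.sort(key=lambda x: x[1])
--     return matches
-- ===== SOURCE B (Python) =====
-- def find_semitone_matches(target_midi, available_midi_notes, max_distance=2):
--     # Bucket matches by their (bounded, integer) distance in one pass, then
--     # emit buckets in increasing distance order: no stable sort over the pairs.
--     buckets = {}
--     for midi in available_midi_notes:
--         distance = abs(midi - target_midi)
--         if distance <= max_distance:
--             buckets.setdefault(distance, []).append((midi, distance))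
--     result = []
--     for d in sorted(buckets):
--         result += buckets[d]
--     return result
-- ===== Notes on version B (the rewrite author's own statement) =====
-- stated objective: alternative
-- what changed: Replaces filter-then-stable-sort of all matching pairs with a single-pass bucketing by integer distance followed by emitting the buckets in increasing distance order; only the distinct distances are sorted. Same cost on distinct-distance inputs.
import Mathlib
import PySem

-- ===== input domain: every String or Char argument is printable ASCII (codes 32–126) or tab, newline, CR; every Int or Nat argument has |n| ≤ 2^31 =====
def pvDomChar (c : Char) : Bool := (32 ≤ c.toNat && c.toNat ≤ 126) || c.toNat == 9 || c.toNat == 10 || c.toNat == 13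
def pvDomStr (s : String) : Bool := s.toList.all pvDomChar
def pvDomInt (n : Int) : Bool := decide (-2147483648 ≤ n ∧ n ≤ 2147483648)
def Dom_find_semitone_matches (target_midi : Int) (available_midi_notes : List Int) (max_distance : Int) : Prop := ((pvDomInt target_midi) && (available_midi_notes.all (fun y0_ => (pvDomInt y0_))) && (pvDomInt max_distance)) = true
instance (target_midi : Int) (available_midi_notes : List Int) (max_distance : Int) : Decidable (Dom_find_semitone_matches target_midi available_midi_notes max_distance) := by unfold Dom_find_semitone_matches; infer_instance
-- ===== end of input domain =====

-- B replaces A's filter-then-stable-sort with one-pass bucketing by distance plus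
-- emitting buckets in increasing distance order (only the distinct distances are sorted).

-- ===== PORT A =====
def find_semitone_matches (target_midi : Int) (available_midi_notes : List Int) (max_distance : Int) : List (Int × Int) :=
  let ms := available_midi_notes.foldl (fun acc midi =>
    let distance := |midi - target_midi|
    if distance ≤ max_distance then acc ++ [(midi, distance)] else acc) []
  PySem.List.sorted ms (fun x => x.2)

-- ===== PORT B =====
def find_semitone_matches_alt (target_midi : Int) (available_midi_notes : List Int) (max_distance : Int) : List (Int × Int) :=
  let buckets : PySem.Dict Int (List (Int × Int)) := available_midi_notes.foldl (fun b midi =>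
    let distance := |midi - target_midi|
    if distance ≤ max_distance then b.modify distance [] (fun v => v ++ [(midi, distance)]) else b)
    PySem.Dict.empty
  -- the final loop reads buckets[d] for d iterating over buckets' own keys, so the
  -- lookup never raises; Dict.getD is exact here
  (PySem.List.sorted buckets.keys (fun k => k)).foldl (fun acc d => acc ++ buckets.getD d []) []

-- ===== PRECONDITION & SPEC =====
def Spec_find_semitone_matches (target_midi : Int) (available_midi_notes : List Int) (max_distance : Int) (out : List (Int × Int)) : Prop := out = find_semitone_matches_alt target_midi available_midi_notes max_distance
instance (target_midi : Int) (available_midi_notes : List Int) (max_distance : Int) (out : List (Int × Int)) : Decidable (Spec_find_semitone_matches target_midi available_midi_notes max_distance out) := by unfold Spec_find_semitone_matches; infer_instance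

-- ===== CLAIM (what is proved, stated in full; the proofs are below) =====
def Claim_equal_find_semitone_matches : Prop := ∀ (target_midi : Int) (available_midi_notes : List Int) (max_distance : Int), Dom_find_semitone_matches target_midi available_midi_notes max_distance → Spec_find_semitone_matches target_midi available_midi_notes max_distance (find_semitone_matches target_midi available_midi_notes max_distance)

-- ===== LEMMAS AND PROOFS =====

-- insertBy over a prefix none of whose elements trigger `before` skips the prefix
theorem pv_insertBy_append_left {α : Type} (before : α → α → Bool) (x : α) (ys zs : List α)
    (h : ∀ y ∈ ys, before x y = false) :
    PySem.List.insertBy before x (ys ++ zs) = ys ++ PySem.List.insertBy before x zs := by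
  induction ys with
  | nil => rfl
  | cons y ys ih =>
    have hy : before x y = false := h y (by simp)
    simp [PySem.List.insertBy, hy, ih (fun z hz => h z (by simp [hz]))]

-- insertBy before a list every element of which triggers `before` prepends
theorem pv_insertBy_all_before {α : Type} (before : α → α → Bool) (x : α) (zs : List α)
    (h : ∀ z ∈ zs, before x z = true) :
    PySem.List.insertBy before x zs = x :: zs := by
  cases zs with
  | nil => rfl
  | cons z zs => simp [PySem.List.insertBy, h z (by simp)]

-- flatMap respects pointwise equality on members
theorem pv_flatMap_congr {α β : Type} {l : List α} {f g : α → List β}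
    (h : ∀ a ∈ l, f a = g a) : l.flatMap f = l.flatMap g := by
  induction l with
  | nil => rfl
  | cons a l ih =>
    simp only [List.flatMap_cons, h a (by simp), ih (fun b hb => h b (by simp [hb]))]

-- stable sort by an integer key = concatenation of the equal-key blocks, taken in
-- increasing key order (ks: any strictly increasing list covering all keys of M)
theorem pv_sorted_blocks {α : Type} (key : α → Int) (M : List α) (ks : List Int)
    (hks : ks.Pairwise (· < ·)) (hcov : ∀ q ∈ M, key q ∈ ks) :
    PySem.List.sorted M key = ks.flatMap (fun k => M.filter (fun q => key q == k)) := by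
  induction M using List.reverseRecOn with
  | nil =>
    rw [PySem.List.sorted_eq_foldl_insertBy]
    simp
  | append_singleton M x IH =>
    have hcovM : ∀ q ∈ M, key q ∈ ks := fun q hq => hcov q (by simp [hq])
    have hx : key x ∈ ks := hcov x (by simp)
    -- sorted (M ++ [x]) = insertBy x (sorted M)
    rw [PySem.List.sorted_eq_foldl_insertBy, List.foldl_append]
    simp only [List.foldl_cons, List.foldl_nil]
    rw [← PySem.List.sorted_eq_foldl_insertBy, IH hcovM]
    set bef : α → α → Bool := fun a b => decide (key a < key b) with hbef
    set F : Int → List α := fun k => M.filter (fun q => key q == k) with hF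
    -- split ks at key x
    set P : Int → Bool := fun k => decide (k ≤ key x) with hP
    have hsplit : ks.takeWhile P ++ ks.dropWhile P = ks := List.takeWhile_append_dropWhile
    have htwpw : (ks.takeWhile P).Pairwise (· < ·) := hks.sublist (List.takeWhile_sublist _)
    have hdwpw : (ks.dropWhile P).Pairwise (· < ·) := hks.sublist (List.dropWhile_sublist _)
    have htw_le : ∀ k ∈ ks.takeWhile P, k ≤ key x := by
      intro k hk
      have := List.mem_takeWhile_imp hk
      simpa [hP] using this
    have hdw_gt : ∀ k ∈ ks.dropWhile P, key x < k := by
      intro k hk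
      cases hdw : ks.dropWhile P with
      | nil => rw [hdw] at hk; simp at hk
      | cons h rest =>
        have hh : P h = false := by
          have := List.head_dropWhile_not P (l := ks) (by rw [hdw]; simp)
          simpa [hdw] using this
        have hh' : key x < h := by simpa [hP] using hh
        rw [hdw] at hk hdwpw
        rcases List.mem_cons.mp hk with rfl | hk'
        · exact hh'
        · exact lt_trans hh' ((List.pairwise_cons.mp hdwpw).1 k hk')
    -- key x is in the takeWhile part, and is its last element
    have hxtw : key x ∈ ks.takeWhile P := by
      have hx' : key x ∈ ks.takeWhile P ++ ks.dropWhile P := by rw [hsplit]; exact hx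
      rcases List.mem_append.mp hx' with h' | h'
      · exact h'
      · exact absurd (hdw_gt _ h') (lt_irrefl _)
    rcases List.eq_nil_or_concat (ks.takeWhile P) with hnil | ⟨ys, z, hconc⟩
    · rw [hnil] at hxtw; simp at hxtw
    have hconc' : ks.takeWhile P = ys ++ [z] := by simpa [List.concat_eq_append] using hconc
    have hz : z = key x := by
      have hzle : z ≤ key x := htw_le z (by simp [hconc'])
      have htwpw' := hconc' ▸ htwpw
      have hxtw' := hconc' ▸ hxtw
      rcases List.mem_append.mp hxtw' with h' | h'
      · have := ((List.pairwise_append.mp htwpw').2.2) _ h' z (by simp)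
        omega
      · simp at h'
        omega
    have hys_lt : ∀ k ∈ ys, k < key x := by
      intro k hk
      have := (List.pairwise_append.mp (hconc' ▸ htwpw)).2.2 k hk z (by simp)
      omega
    -- decompose ks
    have hks_dec : ks = ys ++ [key x] ++ ks.dropWhile P := by
      conv_lhs => rw [← hsplit]
      rw [hconc', hz]
    -- the new filters
    have hFnew : ∀ k : Int, (M ++ [x]).filter (fun q => key q == k)
        = F k ++ (if key x = k then [x] else []) := by
      intro k
      rw [List.filter_append]
      congr 1
      by_cases h : key x = k <;> simp [h]
    -- every member of a block F k carries key k
    have hkeyF : ∀ (k : Int), ∀ q ∈ F k, key q = k := by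
      intro k q hq
      have := List.of_mem_filter hq
      simpa using this
    rw [hks_dec]
    simp only [List.flatMap_append]
    -- right side blocks: ys blocks unchanged, key-x block gains x, dropWhile blocks unchanged
    have hys_blocks : ys.flatMap (fun k => (M ++ [x]).filter (fun q => key q == k))
        = ys.flatMap F := by
      apply pv_flatMap_congr
      intro k hk
      rw [hFnew k]
      have : key x ≠ k := by have := hys_lt k hk; omega
      simp [this]
    have hdw_blocks : (ks.dropWhile P).flatMap (fun k => (M ++ [x]).filter (fun q => key q == k))
        = (ks.dropWhile P).flatMap F := by
      apply pv_flatMap_congr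
      intro k hk
      rw [hFnew k]
      have : key x ≠ k := by have := hdw_gt k hk; omega
      simp [this]
    have hmid : List.flatMap (fun k => (M ++ [x]).filter (fun q => key q == k)) [key x]
        = F (key x) ++ [x] := by
      simp only [List.flatMap_cons, List.flatMap_nil, List.append_nil]
      rw [hFnew (key x)]
      simp
    rw [hys_blocks, hdw_blocks, hmid]
    -- left side: insertBy skips the ys blocks and the key-x block, stops before the rest
    have h1 : ∀ q ∈ ys.flatMap F ++ F (key x), bef x q = false := by
      intro q hq
      rcases List.mem_append.mp hq with h' | h'
      · rcases List.mem_flatMap.mp h' with ⟨k, hk, hqk⟩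
        have e1 := hkeyF k q hqk
        have e2 := hys_lt k hk
        simp [hbef]; omega
      · have := hkeyF (key x) q h'
        simp [hbef]; omega
    have h2 : ∀ q ∈ (ks.dropWhile P).flatMap F, bef x q = true := by
      intro q hq
      rcases List.mem_flatMap.mp hq with ⟨k, hk, hqk⟩
      have e1 := hkeyF k q hqk
      have e2 := hdw_gt k hk
      simp [hbef]; omega
    have hL : PySem.List.insertBy bef x
        (ys.flatMap F ++ ([key x].flatMap F ++ (ks.dropWhile P).flatMap F))
        = (ys.flatMap F ++ F (key x)) ++ (x :: (ks.dropWhile P).flatMap F) := by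
      rw [show ys.flatMap F ++ ([key x].flatMap F ++ (ks.dropWhile P).flatMap F)
          = (ys.flatMap F ++ F (key x)) ++ (ks.dropWhile P).flatMap F by simp]
      rw [pv_insertBy_append_left bef x _ _ h1, pv_insertBy_all_before bef x _ h2]
    simp only [List.append_assoc] at hL ⊢
    rw [hL]
    simp

theorem find_semitone_matches_spec : Claim_equal_find_semitone_matches := by
  intro t notes m _
  unfold Spec_find_semitone_matches find_semitone_matches find_semitone_matches_alt
  simp only []
  -- name the filtered match list
  set p : Int → Prop := fun midi => |midi - t| ≤ m with hp
  set f : Int → Int × Int := fun midi => (midi, |midi - t|) with hf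
  set ms : List (Int × Int) := (notes.filter (fun x => decide (p x))).map f with hM
  have hA : notes.foldl (fun acc midi =>
      if |midi - t| ≤ m then acc ++ [(midi, |midi - t|)] else acc) [] = ms := by
    rw [PySem.List.foldl_append_ite p f]
    simp [hM]
  -- B's bucket dict as a fold over the tagged match list
  set M2 : List (Int × (Int × Int)) := ms.map (fun q => (q.2, q)) with hM2
  have hB : notes.foldl (fun b midi =>
      if |midi - t| ≤ m then b.modify (|midi - t|) [] (fun v => v ++ [(midi, |midi - t|)]) else b)
      PySem.Dict.empty
      = M2.foldl (fun d q => d.modify q.1 [] (fun v => v ++ [q.2])) PySem.Dict.empty := by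
    rw [PySem.List.foldl_ite_eq_foldl_filter p]
    rw [hM2, hM, List.map_map, List.foldl_map]
    rfl
  set buckets := M2.foldl (fun d q => d.modify q.1 [] (fun v => v ++ [q.2])) PySem.Dict.empty with hb
  have hgetD : ∀ k : Int, buckets.getD k [] = ms.filter (fun q => q.2 == k) := by
    intro k
    rw [hb, PySem.Dict.getD_foldl_modify_append]
    rw [hM2, List.filter_map, List.map_map]
    simp [Function.comp_def]
  have hkeys : buckets.keys = PySem.Set.ofList (ms.map (fun q => q.2)) := by
    rw [hb]
    have := PySem.Dict.keys_foldl_modify_key (l := M2) (key := fun q => q.1) (d0 := ([] : List (Int × Int)))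
      (f := fun _ q => (fun v => v ++ [q.2])) (d := PySem.Dict.empty)
    rw [this, PySem.Dict.keys_empty, PySem.Set.ofList_eq_foldl, hM2, List.map_map]
    rfl
  rw [hA, hB, hkeys]
  set ks := PySem.List.sorted (PySem.Set.ofList (ms.map (fun q => q.2))) (fun k => k) with hks
  rw [PySem.List.foldl_append_eq_flatMap, List.nil_append]
  have hcov : ∀ q ∈ ms, q.2 ∈ ks := by
    intro q hq
    rw [hks, PySem.List.mem_sorted, PySem.Set.mem_ofList]
    exact List.mem_map_of_mem hq
  rw [pv_sorted_blocks (fun q => q.2) ms ks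
    (by rw [hks]; exact PySem.List.sorted_ofList_pairwise_lt _) hcov]
  apply pv_flatMap_congr
  intro k _
  exact (hgetD k).symm
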